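-- pv_equiv track=rewrite | github.com/do-develop/python_practice | leet831_masking_personal_information.py | maskPII
-- ===== SOURCE A (Python) =====
-- def maskPII(s: str) -> str:
--     phone = "***-***-"
--     mail = ""
--     counter = 0
--     if '@' not in s: # this is a phone number
--         last_digit = ""
--         idx = -1
--         while len(last_digit) < 4:
--             if s[idx].isnumeric():
--                 last_digit += s[idx]
--             idx -= 1
--         for i in range(len(s)):
--             if s[i].isnumeric():
--                 counter += 1
--         if counter == 10: # only local number
--             return phone + last_digit[::-1]
--         elif counter > 10:
--             return '+' + ('*'*(counter-10)) + '-' + phone + last_digit[::-1]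
--     else: # this is an email address
--         pos = s.index('@')
--         mail += s[0]
--         mail += "*****"
--         mail += s[pos-1:len(s)]
--         return mail.lower()
-- ===== SOURCE B (Python) =====
-- def maskPII(s: str) -> str:
--     if '@' in s:
--         pos = s.index('@')
--         return (s[0] + "*****" + s[pos-1:]).lower()
--     digits = "".join(c for c in s if c.isnumeric())
--     counter = len(digits)
--     if counter == 10:
--         return "***-***-" + digits[-4:]
--     elif counter > 10:
--         return '+' + '*' * (counter - 10) + '-***-***-' + digits[-4:]
-- ===== Notes on version B (the rewrite author's own statement) =====
-- stated objective: simpler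
-- what changed: The phone branch's backward while-loop over negative indices plus a separate counting loop are replaced by a single forward pass collecting all digits, with the count as its length and the last four taken by one slice (no reversal).
-- outside the precondition, e.g. on maskPII('12 3456'): A returns None, B returns None; on maskPII('123'): A raises IndexError, B returns None
import Mathlib
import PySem

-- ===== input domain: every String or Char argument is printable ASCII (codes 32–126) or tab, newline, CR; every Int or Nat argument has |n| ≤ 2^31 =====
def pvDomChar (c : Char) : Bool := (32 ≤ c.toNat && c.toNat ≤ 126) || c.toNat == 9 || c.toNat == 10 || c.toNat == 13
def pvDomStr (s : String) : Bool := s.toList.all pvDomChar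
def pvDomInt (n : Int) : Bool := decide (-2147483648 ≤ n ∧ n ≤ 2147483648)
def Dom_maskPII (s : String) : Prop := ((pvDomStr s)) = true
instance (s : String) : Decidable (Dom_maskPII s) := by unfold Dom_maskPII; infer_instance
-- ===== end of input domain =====

-- B rewrites the phone branch as one forward pass collecting the digits, taking the last four by a slice.
-- Note: on the admitted ASCII domain Python's isnumeric() coincides with isdigit() (exact there).

-- ===== PORT A =====
-- A's while-loop walks s[-1], s[-2], … collecting numeric chars until it has 4; that is a scan of the
-- reversed char list, and running past the front is Python's IndexError (modelled as none).
def maskPIIwhile (cs : List Char) (acc : List Char) : Option (List Char) :=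
  if acc.length ≥ 4 then some acc
  else
    match cs with
    | [] => none
    | c :: rest => maskPIIwhile rest (if PySem.Chars.isdigit c then acc ++ [c] else acc)

def maskPII (s : String) : String :=
  if ¬ s.toList.contains '@' then
    match maskPIIwhile s.toList.reverse [] with
    | none => ""  -- Python raises IndexError here (outside Pre_)
    | some last_digit =>
      let counter := s.toList.foldl (fun n c => if PySem.Chars.isdigit c then n + 1 else n) 0
      if counter = 10 then
        String.ofList ("***-***-".toList ++ last_digit.reverse)
      else if counter > 10 then
        String.ofList ('+' :: List.replicate (counter - 10) '*' ++ '-' :: "***-***-".toList ++ last_digit.reverse)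
      else ""  -- Python returns None here (outside Pre_)
  else
    match PySem.List.pyGet? s.toList 0 with
    | none => ""  -- unreachable: s contains '@', hence is nonempty
    | some c0 =>
      String.ofList (PySem.Chars.lower
        (c0 :: ("*****".toList ++
          PySem.List.slice s.toList (some ((s.toList.findIdx (· == '@') : Int) - 1)) (some (s.toList.length : Int)))))

-- ===== PORT B =====
def maskPII_alt (s : String) : String :=
  if s.toList.contains '@' then
    match s.toList with
    | [] => ""  -- unreachable: s contains '@', hence is nonempty
    | c0 :: _ =>
      String.ofList (PySem.Chars.lower
        (c0 :: ("*****".toList ++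
          PySem.List.slice s.toList (some ((s.toList.findIdx (· == '@') : Int) - 1)) none)))
  else
    let digits := s.toList.filter PySem.Chars.isdigit
    let counter := digits.length
    if counter = 10 then
      String.ofList ("***-***-".toList ++ PySem.List.slice digits (some (-4)) none)
    else if counter > 10 then
      String.ofList ('+' :: List.replicate (counter - 10) '*' ++ '-' :: "***-***-".toList ++ PySem.List.slice digits (some (-4)) none)
    else ""  -- Python returns None here (outside Pre_)

-- ===== PRECONDITION & SPEC =====
-- Pre_ excludes exactly the phone-branch inputs with fewer than 10 digits: with < 4 digits A raises
-- IndexError, and with 4–9 digits A falls through and returns None, not a string.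
def Pre_maskPII (s : String) : Prop :=
  '@' ∈ s.toList ∨ 10 ≤ (s.toList.filter PySem.Chars.isdigit).length
instance (s : String) : Decidable (Pre_maskPII s) := by unfold Pre_maskPII; infer_instance
def pvWitness_maskPII : String := "1(234)567-890"

def Spec_maskPII (s : String) (out : String) : Prop := out = maskPII_alt s
instance (s : String) (out : String) : Decidable (Spec_maskPII s out) := by unfold Spec_maskPII; infer_instance

-- ===== CLAIM (what is proved, stated in full; the proofs are below) =====
def Claim_equal_maskPII : Prop := ∀ (s : String), Dom_maskPII s → Pre_maskPII s → Spec_maskPII s (maskPII s)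

-- ===== LEMMAS AND PROOFS =====

-- The counting for-loop counts the digit characters.
theorem maskPII_count (cs : List Char) (n : Nat) :
    cs.foldl (fun n c => if PySem.Chars.isdigit c then n + 1 else n) n
      = n + (cs.filter PySem.Chars.isdigit).length := by
  induction cs generalizing n with
  | nil => simp
  | cons c rest ih =>
    simp only [List.foldl, List.filter_cons]
    by_cases h : PySem.Chars.isdigit c = true
    · simp only [h, if_pos, List.length_cons, ih]; omega
    · simp [h, ih]

-- The while-loop extends the accumulator with digits up to total length 4, or returns none (IndexError)
-- if the characters run out first.
theorem maskPIIwhile_spec (cs acc : List Char) :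
    maskPIIwhile cs acc
      = if 4 ≤ acc.length + (cs.filter PySem.Chars.isdigit).length
        then some (acc ++ (cs.filter PySem.Chars.isdigit).take (4 - acc.length))
        else none := by
  induction cs generalizing acc with
  | nil =>
    rw [maskPIIwhile]
    simp only [List.filter_nil, List.length_nil, Nat.add_zero, List.take_nil]
    by_cases h : acc.length ≥ 4
    · rw [if_pos h, if_pos h]; simp
    · rw [if_neg h, if_neg h]
  | cons c rest ih =>
    rw [maskPIIwhile]
    by_cases h : acc.length ≥ 4
    · rw [if_pos h, if_pos (by omega)]
      have h4 : 4 - acc.length = 0 := by omega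
      simp [h4]
    · rw [if_neg h]
      by_cases hc : PySem.Chars.isdigit c = true
      · rw [if_pos hc, ih]
        simp only [List.filter_cons, hc, if_pos, List.length_append, List.length_cons,
          List.length_nil]
        by_cases hbig : 4 ≤ acc.length + (0 + 1) + (rest.filter PySem.Chars.isdigit).length
        · rw [if_pos hbig, if_pos (by omega)]
          have hstep : 4 - acc.length = (4 - (acc.length + (0 + 1))) + 1 := by omega
          rw [hstep, List.take_succ_cons]
          simp
        · rw [if_neg hbig, if_neg (by omega)]
      · rw [if_neg hc, ih]
        simp [hc]

-- s[a:len(s)] = s[a:]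
theorem slice_len_eq_none (cs : List Char) (a : Int) :
    PySem.List.slice cs (some a) (some (cs.length : Int)) = PySem.List.slice cs (some a) none := by
  rw [PySem.List.slice_some_none, PySem.List.slice]
  simp only [PySem.List.clampIdx_natCast, min_self]
  apply List.take_of_length_le
  simp

-- ===== VERDICT (by name: the statement is the Claim_ definition above) =====
theorem maskPII_spec : Claim_equal_maskPII := by
  intro s _ hpre
  unfold Spec_maskPII maskPII maskPII_alt
  by_cases hat : s.toList.contains '@' = true
  · -- email branch
    rw [if_neg (by simpa using hat), if_pos hat]
    cases h : s.toList with
    | nil => rw [h] at hat; simp at hat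
    | cons c0 rest =>
      simp only [PySem.List.pyGet?_zero_cons]
      rw [slice_len_eq_none]
  · -- phone branch
    have hd : 10 ≤ (s.toList.filter PySem.Chars.isdigit).length := by
      rcases hpre with h | h
      · exact absurd (List.contains_iff_mem.mpr h) (by simpa using hat)
      · exact h
    rw [if_pos hat, if_neg hat]
    rw [maskPIIwhile_spec, List.filter_reverse]
    rw [if_pos (by simp only [List.length_nil, List.length_reverse, Nat.zero_add]; omega)]
    rw [maskPII_count]
    have htake : (((s.toList.filter PySem.Chars.isdigit).reverse.take 4)).reverse
        = (s.toList.filter PySem.Chars.isdigit).drop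
            ((s.toList.filter PySem.Chars.isdigit).length - 4) := by
      rw [List.take_reverse, List.reverse_reverse]
    have hslice : PySem.List.slice (s.toList.filter PySem.Chars.isdigit) (some (-4)) none
        = (s.toList.filter PySem.Chars.isdigit).drop
            ((s.toList.filter PySem.Chars.isdigit).length - 4) := by
      rw [PySem.List.slice_from_neg_ofNat _ 4 (by omega)]
    simp only [List.nil_append, List.length_nil, Nat.sub_zero, Nat.zero_add, htake, hslice]
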